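-- pv_equiv track=rewrite | github.com/maahin2005/DSA_in_PYTHON | Strings_Problem/SubStringUnderCondition.py | Solve
-- ===== SOURCE A (Python) =====
-- def Solve(S):
--     # Step 1: Count frequency of each character
--     freq = {}
--
--     for char in S:
--         if char in freq:
--             freq[char] += 1
--         else:
--             freq[char] = 1
--
--     # Step 2: Calculate substrings for each character
--     count = 0
--     for char in freq:
--         f = freq[char]
--
--         # Using the formula to calculate the number of substrings
--         count += (f * (f + 1)) // 2
--
--     return count
-- ===== SOURCE B (Python) =====
-- def Solve(S):
--     seen = {}
--     count = 0
--     for char in S: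
--         seen[char] = seen.get(char, 0) + 1
--         count += seen[char]
--     return count
-- ===== Notes on version B (the rewrite author's own statement) =====
-- stated objective: alternative
-- what changed: B replaces A's two-phase approach (build a full frequency table, then a second loop applying the closed-form f*(f+1)//2 per distinct character) with a single interleaved pass that adds the running occurrence count of each character as it is seen, accumulating each triangular number incrementally.
import Mathlib
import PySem

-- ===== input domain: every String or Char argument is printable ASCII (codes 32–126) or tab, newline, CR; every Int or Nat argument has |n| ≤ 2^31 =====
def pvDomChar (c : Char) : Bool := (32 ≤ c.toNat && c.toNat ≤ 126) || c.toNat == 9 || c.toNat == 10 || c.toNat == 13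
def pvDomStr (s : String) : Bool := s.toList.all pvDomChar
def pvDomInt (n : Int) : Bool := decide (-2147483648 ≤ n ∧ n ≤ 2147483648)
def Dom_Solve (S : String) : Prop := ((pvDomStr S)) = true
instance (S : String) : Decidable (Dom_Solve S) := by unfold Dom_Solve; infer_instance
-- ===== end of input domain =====

-- B replaces A's two-phase frequency-table + closed-form pass with one interleaved pass
-- adding the running occurrence count of each character; same O(n) cost, different decomposition.

-- ===== PORT A =====
def Solve (S : String) : Int :=
  -- Step 1: count frequency of each character
  let freq := S.toList.foldl
    (fun d c => if d.contains c then d.insert c (d.getD c 0 + 1) else d.insert c 1)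
    PySem.Dict.empty
  -- Step 2: for char in freq: count += (f * (f + 1)) // 2
  freq.keys.foldl
    (fun count c =>
      let f := freq.getD c 0
      count + PySem.Int.floordiv (f * (f + 1)) 2)
    0

-- ===== PORT B =====
def Solve_alt (S : String) : Int :=
  (S.toList.foldl
    (fun (p : PySem.Dict Char Int × Int) c =>
      let n := p.1.getD c 0 + 1
      (p.1.insert c n, p.2 + n))
    (PySem.Dict.empty, 0)).2

-- ===== PRECONDITION & SPEC =====
def Spec_Solve (S : String) (out : Int) : Prop := out = Solve_alt S
instance (S : String) (out : Int) : Decidable (Spec_Solve S out) := by unfold Spec_Solve; infer_instance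

-- ===== CLAIM (what is proved, stated in full; the proofs are below) =====
def Claim_equal_Solve : Prop := ∀ (S : String), Dom_Solve S → Spec_Solve S (Solve S)

-- ===== LEMMAS AND PROOFS =====

-- A's triangular term for a character occurring m times
def triTerm (m : Nat) : Int := PySem.Int.floordiv ((m : Int) * ((m : Int) + 1)) 2

lemma triTerm_succ (m : Nat) : triTerm (m + 1) = triTerm m + (m : Int) + 1 := by
  unfold triTerm
  have h1 : ((m : Int) * ((m : Int) + 1)) = ((m * (m + 1) : Nat) : Int) := by push_cast; ring
  have h2 : (((m + 1 : Nat) : Int) * (((m + 1 : Nat) : Int) + 1)) = (((m + 1) * (m + 2) : Nat) : Int) := by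
    push_cast; ring
  rw [h1, h2]
  rw [show (2 : Int) = ((2 : Nat) : Int) from rfl,
      PySem.Int.floordiv_natCast, PySem.Int.floordiv_natCast]
  have : (m + 1) * (m + 2) / 2 = m * (m + 1) / 2 + (m + 1) := by
    have h1 : (m + 1) * (m + 2) = m * (m + 1) + 2 * (m + 1) := by ring
    have h2 : 2 ∣ m * (m + 1) := (Nat.even_mul_succ_self m).two_dvd
    omega
  rw [this]; push_cast; ring

-- sums over a Nodup list when the mapped functions differ only at one member
lemma sum_map_update {l : List Char} (hl : l.Nodup) {c : Char} (hc : c ∈ l)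
    (f g : Char → Int) (h : ∀ k ∈ l, k ≠ c → f k = g k) :
    (l.map f).sum = (l.map g).sum + (f c - g c) := by
  induction l with
  | nil => cases hc
  | cons x xs ih =>
    rcases List.mem_cons.mp hc with rfl | hmem
    · have : ∀ k ∈ xs, f k = g k := fun k hk =>
        h k (List.mem_cons_of_mem _ hk) (fun he => (List.nodup_cons.mp hl).1 (he ▸ hk))
      simp [List.map_congr_left this]; ring
    · have hx : f x = g x :=
        h x List.mem_cons_self (fun he => (List.nodup_cons.mp hl).1 (he ▸ hmem))
      have := ih (List.nodup_cons.mp hl).2 hmem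
        (fun k hk hkc => h k (List.mem_cons_of_mem _ hk) hkc)
      simp [hx, this]; ring

-- A's value on a character list, as a sum of triangular terms over the distinct characters
def sumTri (cs : List Char) : Int :=
  ((PySem.Set.ofList cs).map (fun k => triTerm (cs.count k))).sum

lemma sumTri_snoc (cs : List Char) (c : Char) :
    sumTri (cs ++ [c]) = sumTri cs + (cs.count c : Int) + 1 := by
  unfold sumTri
  rw [PySem.Set.ofList_append_singleton]
  have hcount : ∀ k, (cs ++ [c]).count k = cs.count k + if k = c then 1 else 0 := by
    intro k; rw [List.count_append, List.count_singleton']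
    split_ifs with h h2 h2 <;> simp_all
  by_cases hmem : c ∈ cs
  · have hadd : PySem.Set.add (PySem.Set.ofList cs) c = PySem.Set.ofList cs := by
      simp [PySem.Set.add, PySem.Set.contains, hmem, PySem.Set.mem_ofList]
    rw [hadd]
    have := sum_map_update (l := PySem.Set.ofList cs) (c := c) (PySem.Set.nodup_ofList cs)
      ((PySem.Set.mem_ofList cs c).mpr hmem)
      (fun k => triTerm ((cs ++ [c]).count k)) (fun k => triTerm (cs.count k))
      (fun k _ hk => by simp only [hcount k, if_neg hk, Nat.add_zero])
    rw [this]
    have hc1 : List.count c (cs ++ [c]) = List.count c cs + 1 := by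
      rw [hcount c]; simp
    simp only [hc1, triTerm_succ]
    ring
  · have hadd : PySem.Set.add (PySem.Set.ofList cs) c = PySem.Set.ofList cs ++ [c] := by
      simp [PySem.Set.add, PySem.Set.contains, hmem, PySem.Set.mem_ofList]
    rw [hadd, List.map_append, List.sum_append]
    have hcongr : ∀ k ∈ PySem.Set.ofList cs,
        triTerm ((cs ++ [c]).count k) = triTerm (cs.count k) := by
      intro k hk
      have hkc : k ≠ c := fun he => hmem (he ▸ (PySem.Set.mem_ofList cs k).mp hk)
      rw [hcount k]; simp [hkc]
    rw [List.map_congr_left hcongr]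
    have : cs.count c = 0 := List.count_eq_zero.mpr hmem
    simp [hcount, this, triTerm]

-- A's frequency loop builds Counter(S)
lemma freq_eq_counter (cs : List Char) :
    cs.foldl (fun d c => if d.contains c then d.insert c (d.getD c 0 + 1) else d.insert c 1)
      PySem.Dict.empty = PySem.Dict.counter cs := by
  have hfun : (fun (d : PySem.Dict Char Int) c =>
      if d.contains c then d.insert c (d.getD c 0 + 1) else d.insert c 1)
      = (fun d c => d.insert c (d.getD c 0 + 1)) := by
    funext d c
    by_cases h : d.contains c
    · simp [h]
    · have h0 : d.contains c = false := by simpa using h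
      simp [h0, PySem.Dict.getD_of_not_contains d (0 : Int) h0]
  rw [hfun, PySem.Dict.foldl_insert_getD_add_one_eq_counter]

-- A equals sumTri
lemma solveA_eq_sumTri (S : String) : Solve S = sumTri S.toList := by
  unfold Solve
  rw [freq_eq_counter]
  rw [PySem.List.foldl_add (g := fun c =>
    PySem.Int.floordiv ((PySem.Dict.counter S.toList).getD c 0 *
      ((PySem.Dict.counter S.toList).getD c 0 + 1)) 2)]
  unfold sumTri
  rw [PySem.Dict.keys_counter]
  simp [PySem.Dict.getD_counter, triTerm]

-- B's pair fold: first component is the insert-count loop, i.e. Counter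
lemma altFold_fst (cs : List Char) (d : PySem.Dict Char Int) (a : Int) :
    (cs.foldl (fun (p : PySem.Dict Char Int × Int) c =>
      (p.1.insert c (p.1.getD c 0 + 1), p.2 + (p.1.getD c 0 + 1))) (d, a)).1
    = cs.foldl (fun d c => d.insert c (d.getD c 0 + 1)) d := by
  induction cs generalizing d a with
  | nil => rfl
  | cons x xs ih => simp [List.foldl_cons, ih]

-- B equals sumTri
lemma solveB_eq_sumTri (S : String) : Solve_alt S = sumTri S.toList := by
  unfold Solve_alt
  simp only []
  induction S.toList using List.reverseRecOn with
  | nil => rfl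
  | append_singleton cs c ih =>
    rw [List.foldl_append]
    simp only [List.foldl_cons, List.foldl_nil]
    rw [sumTri_snoc, ← ih]
    have h1 := altFold_fst cs PySem.Dict.empty 0
    rw [show (fun (p : PySem.Dict Char Int × Int) c =>
          let n := p.1.getD c 0 + 1; (p.1.insert c n, p.2 + n))
        = (fun (p : PySem.Dict Char Int × Int) c =>
          (p.1.insert c (p.1.getD c 0 + 1), p.2 + (p.1.getD c 0 + 1))) from rfl] at *
    rw [h1, PySem.Dict.foldl_insert_getD_add_one_eq_counter, PySem.Dict.getD_counter]
    ring

-- ===== VERDICT (by name: the statement is the Claim_ definition above) =====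
theorem Solve_spec : Claim_equal_Solve := by
  intro S _
  unfold Spec_Solve
  rw [solveA_eq_sumTri, solveB_eq_sumTri]
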